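-- pv_equiv track=rewrite | github.com/baconlang/python | examples/grocery-stock/index.py | evaluator_b
-- ===== SOURCE A (Python) =====
-- def get_food_leopard_data():
--     return dict(
--         tomato=5,
--         lemon=6,
--         lime=2,
--         hotdog_bun=4,
--         hotdog=2,
--         hamburger_bun=6,
--         hamburger=3,
--         open=False,
--     )
--
-- def evaluator_b(elements):
--     # Modeling the store "harry_peters" being closed
--     if 'harry_peters' in elements:
--         return False
--
--     data = get_food_leopard_data()
--
--     for element in elements:
--         # Acounting for the "food_leopard" symbol
--         if element == 'food_leopard':
--             continue
--
--         # Check for the item being in stock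
--         if data.get(element):
--             # Reduce stock and continue evaluation of the given expression
--             data[element] -= 1
--             continue
--
--         # Not in stock, expression is falsey
--         else:
--             return False
--
--     # If all symbols were evaluated correctly, we return True
--     return True
-- ===== SOURCE B (Python) =====
-- def evaluator_b(elements):
--     # Closed-store guard, then a stateless count-vs-stock check (no mutation).
--     if 'harry_peters' in elements:
--         return False
--     stock = {'tomato': 5, 'lemon': 6, 'lime': 2, 'hotdog_bun': 4,
--              'hotdog': 2, 'hamburger_bun': 6, 'hamburger': 3}
--     return all(s == 'food_leopard' or elements.count(s) <= stock.get(s, 0)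
--                for s in elements)
-- ===== Notes on version B (the rewrite author's own statement) =====
-- stated objective: simpler
-- what changed: Replaces A's stateful decrement-as-you-go loop over a mutable stock dict with a stateless check: every requested symbol (except food_leopard) must have its total occurrence count within the fixed stock limit.
import Mathlib
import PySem

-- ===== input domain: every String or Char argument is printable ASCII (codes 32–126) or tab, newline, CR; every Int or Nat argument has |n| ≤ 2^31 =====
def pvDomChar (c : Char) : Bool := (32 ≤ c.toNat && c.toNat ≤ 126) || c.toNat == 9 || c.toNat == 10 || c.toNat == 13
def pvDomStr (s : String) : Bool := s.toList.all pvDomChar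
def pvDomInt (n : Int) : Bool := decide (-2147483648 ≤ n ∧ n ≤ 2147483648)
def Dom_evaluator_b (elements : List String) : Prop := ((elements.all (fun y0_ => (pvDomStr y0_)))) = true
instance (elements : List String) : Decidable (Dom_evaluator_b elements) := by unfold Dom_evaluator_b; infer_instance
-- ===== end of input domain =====

-- B replaces A's decrement-as-you-go loop over a mutable stock dict with a stateless
-- count-vs-limit check per requested symbol (simpler; return value proved equal).


-- ===== PORT A =====
-- dict literal of get_food_leopard_data; 'open=False' is modeled as 0: False is falsy
-- exactly like 0 for the truthiness test 'if data.get(element):' and is never decremented.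
def getFoodLeopardData : PySem.Dict String Int :=
  ((((((((PySem.Dict.empty.insert "tomato" 5).insert "lemon" 6).insert "lime" 2).insert
    "hotdog_bun" 4).insert "hotdog" 2).insert "hamburger_bun" 6).insert
    "hamburger" 3).insert "open" 0)

-- the for-loop of A: early 'return False' = false, falling off the end = true
def evalAux : List String → PySem.Dict String Int → Bool
  | [], _ => true
  | e :: rest, data =>
    if e = "food_leopard" then evalAux rest data
    else
      match data.get? e with
      | some v => if v ≠ 0 then evalAux rest (data.insert e (v - 1)) else false
      | none => false

def evaluator_b (elements : List String) : Bool :=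
  if elements.contains "harry_peters" then false
  else evalAux elements getFoodLeopardData

-- ===== PORT B =====
def stockDict : PySem.Dict String Int :=
  ((((((PySem.Dict.empty.insert "tomato" 5).insert "lemon" 6).insert "lime" 2).insert
    "hotdog_bun" 4).insert "hotdog" 2).insert "hamburger_bun" 6).insert "hamburger" 3

def evaluator_b_alt (elements : List String) : Bool :=
  if elements.contains "harry_peters" then false
  else elements.all (fun s =>
    s == "food_leopard" || decide ((PySem.List.count elements s : Int) ≤ stockDict.getD s 0))

-- ===== PRECONDITION & SPEC =====
def Spec_evaluator_b (elements : List String) (out : Bool) : Prop := out = evaluator_b_alt elements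
instance (elements : List String) (out : Bool) : Decidable (Spec_evaluator_b elements out) := by unfold Spec_evaluator_b; infer_instance

-- ===== CLAIM (what is proved, stated in full; the proofs are below) =====
def Claim_equal_evaluator_b : Prop := ∀ (elements : List String), Dom_evaluator_b elements → Spec_evaluator_b elements (evaluator_b elements)

-- ===== LEMMAS AND PROOFS =====

-- A's loop succeeds iff every non-food_leopard element has a stocked entry covering its count.
theorem evalAux_iff (xs : List String) (data : PySem.Dict String Int)
    (hnn : ∀ k v, data.get? k = some v → 0 ≤ v) :
    evalAux xs data = true ↔
      ∀ k ∈ xs, k ≠ "food_leopard" →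
        ∃ v, data.get? k = some v ∧ (xs.count k : Int) ≤ v := by
  induction xs generalizing data with
  | nil => simp [evalAux]
  | cons e rest ih =>
    by_cases hfl : e = "food_leopard"
    · subst hfl
      have hstep : evalAux ("food_leopard" :: rest) data = evalAux rest data := by
        simp [evalAux]
      rw [hstep, ih data hnn]
      constructor
      · intro h k hk hne
        rcases List.mem_cons.mp hk with rfl | hk
        · exact absurd rfl hne
        · rcases h k hk hne with ⟨v, hv, hc⟩
          exact ⟨v, hv, by simpa [List.count_cons, Ne.symm hne] using hc⟩
      · intro h k hk hne
        rcases h k (List.mem_cons_of_mem _ hk) hne with ⟨v, hv, hc⟩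
        exact ⟨v, hv, by simpa [List.count_cons, Ne.symm hne] using hc⟩
    · have hstep : evalAux (e :: rest) data =
          match data.get? e with
          | some v => if v ≠ 0 then evalAux rest (data.insert e (v - 1)) else false
          | none => false := by
        simp [evalAux, hfl]
      cases hget : data.get? e with
      | none =>
        rw [hstep, hget]
        simp only [Bool.false_eq_true, false_iff]
        intro h
        rcases h e List.mem_cons_self hfl with ⟨v, hv, -⟩
        rw [hget] at hv; simp at hv
      | some v =>
        by_cases hv0 : v ≠ 0
        · have hvpos : 1 ≤ v := lt_of_le_of_ne (hnn e v hget) (Ne.symm hv0)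
          have hnn' : ∀ k w, (data.insert e (v - 1)).get? k = some w → 0 ≤ w := by
            intro k w hw
            rw [PySem.Dict.get?_insert] at hw
            split_ifs at hw with hk
            · have : w = v - 1 := (Option.some.inj hw).symm
              omega
            · exact hnn k w hw
          rw [hstep, hget]
          simp only [if_pos hv0]
          rw [ih (data.insert e (v - 1)) hnn']
          constructor
          · intro h k hk hne
            by_cases hke : k = e
            · subst hke
              refine ⟨v, hget, ?_⟩
              by_cases hkr : k ∈ rest
              · rcases h k hkr hne with ⟨w, hw, hc⟩
                rw [PySem.Dict.get?_insert, if_pos rfl] at hw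
                have : w = v - 1 := (Option.some.inj hw).symm
                subst this
                simp only [List.count_cons_self]
                push_cast
                omega
              · simp only [List.count_cons_self, List.count_eq_zero_of_not_mem hkr]
                omega
            · rcases List.mem_cons.mp hk with rfl | hk
              · exact absurd rfl hke
              rcases h k hk hne with ⟨w, hw, hc⟩
              rw [PySem.Dict.get?_insert, if_neg hke] at hw
              exact ⟨w, hw, by simpa [List.count_cons, Ne.symm hke] using hc⟩
          · intro h k hk hne
            by_cases hke : k = e
            · subst hke
              rcases h k List.mem_cons_self hfl with ⟨w, hw, hc⟩
              rw [hget] at hw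
              have hwv : v = w := Option.some.inj hw
              refine ⟨v - 1, ?_, ?_⟩
              · rw [PySem.Dict.get?_insert, if_pos rfl]
              · simp only [List.count_cons_self] at hc
                push_cast at hc
                omega
            · rcases h k (List.mem_cons_of_mem _ hk) hne with ⟨w, hw, hc⟩
              refine ⟨w, ?_, ?_⟩
              · rw [PySem.Dict.get?_insert, if_neg hke]; exact hw
              · simpa [List.count_cons, Ne.symm hke] using hc
        · rw [not_not] at hv0; subst hv0
          rw [hstep, hget]
          simp only [ne_eq, not_true_eq_false, if_false, Bool.false_eq_true, false_iff]
          intro h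
          rcases h e List.mem_cons_self hfl with ⟨w, hw, hc⟩
          rw [hget] at hw
          have hw0 : (0 : Int) = w := Option.some.inj hw
          simp only [List.count_cons_self] at hc
          push_cast at hc
          omega

-- data lemma relating the two dict literals on every key
theorem gfld_get? (s : String) :
    getFoodLeopardData.get? s = if s = "open" then some 0 else stockDict.get? s := by
  simp only [getFoodLeopardData, stockDict, PySem.Dict.get?_insert, PySem.Dict.get?_empty]

theorem gfld_nonneg : ∀ k v, getFoodLeopardData.get? k = some v → 0 ≤ v := by
  intro k v h
  rw [gfld_get?] at h
  split_ifs at h with hk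
  · have : v = 0 := by injection h; omega
    omega
  · simp only [stockDict, PySem.Dict.get?_insert, PySem.Dict.get?_empty] at h
    split_ifs at h <;> (have := Option.some.inj h; omega)

-- ===== VERDICT (by name: the statement is the Claim_ definition above) =====
theorem evaluator_b_spec : Claim_equal_evaluator_b := by
  intro elements _
  unfold Spec_evaluator_b evaluator_b evaluator_b_alt
  cases hhp : elements.contains "harry_peters" with
  | true => simp only [if_true]
  | false =>
    simp only [Bool.false_eq_true, if_false]
    rw [Bool.eq_iff_iff, evalAux_iff elements getFoodLeopardData gfld_nonneg, List.all_eq_true]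
    constructor
    · intro h s hs
      by_cases hfl : s = "food_leopard"
      · simp [hfl]
      · rcases h s hs hfl with ⟨v, hv, hc⟩
        rw [gfld_get?] at hv
        simp only [Bool.or_eq_true, beq_iff_eq, decide_eq_true_eq, PySem.List.count_eq]
        right
        split_ifs at hv with hop
        · subst hop
          have hv0 : (0 : Int) = v := Option.some.inj hv
          have h0 : stockDict.getD "open" (0 : Int) = 0 := by decide
          rw [h0]
          omega
        · rw [PySem.Dict.getD_of_get?_eq_some stockDict 0 hv]
          exact hc
    · intro h k hk hne
      have hf := h k hk
      simp only [Bool.or_eq_true, beq_iff_eq, decide_eq_true_eq, PySem.List.count_eq] at hf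
      rcases hf with hfl' | hle
      · exact absurd hfl' hne
      · rw [gfld_get?]
        have h1 : 0 < elements.count k := List.count_pos_iff.mpr hk
        by_cases hop : k = "open"
        · subst hop
          have h0 : stockDict.getD "open" (0 : Int) = 0 := by decide
          rw [h0] at hle
          exact ⟨0, if_pos rfl, hle⟩
        · rw [if_neg hop]
          cases hg : stockDict.get? k with
          | none =>
            have h0 : stockDict.getD k (0 : Int) = 0 := PySem.Dict.getD_of_get?_eq_none stockDict 0 hg
            rw [h0] at hle
            exfalso
            omega
          | some v =>
            refine ⟨v, rfl, ?_⟩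
            rwa [PySem.Dict.getD_of_get?_eq_some stockDict 0 hg] at hle
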